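-- pv_equiv track=rewrite | github.com/MrBrantCode/unitest_baseline | mut_generate/mist_train_cf/cf_71228/solution.py | find_pairs
-- ===== SOURCE A (Python) =====
-- def find_pairs(values):
--   pairs = set()
--   paired = {}
--   for num in values:
--     if -num in paired:
--       pairs.add((-num, num))
--     paired[num] = True
--   return list(pairs)
-- ===== SOURCE B (Python) =====
-- def find_pairs(values):
--     vals = list(values)
--     result = set()
--     for j in range(len(vals)):
--         for i in range(j):
--             if vals[i] == -vals[j]:
--                 result.add((vals[i], vals[j]))
--     return list(result)
-- ===== Notes on version B (the rewrite author's own statement) =====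
-- stated objective: alternative
-- what changed: Replaces the single pass with a seen-dictionary by an index-based double loop that compares every earlier element against the negation of the current one and collects matches in a set.
import Mathlib
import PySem

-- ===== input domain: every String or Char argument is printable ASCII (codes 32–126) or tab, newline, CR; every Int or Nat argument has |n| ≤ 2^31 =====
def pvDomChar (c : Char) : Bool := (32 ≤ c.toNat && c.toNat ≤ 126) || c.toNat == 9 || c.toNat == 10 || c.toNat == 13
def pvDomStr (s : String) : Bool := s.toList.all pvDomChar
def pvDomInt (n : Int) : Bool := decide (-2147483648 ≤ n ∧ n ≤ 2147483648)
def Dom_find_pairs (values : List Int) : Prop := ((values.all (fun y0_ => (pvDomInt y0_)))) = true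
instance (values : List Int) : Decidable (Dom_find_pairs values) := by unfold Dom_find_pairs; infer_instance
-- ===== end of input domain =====

-- B replaces A's single pass with a seen-dictionary by an index-based double loop; output is a
-- set (list(set) in Python), compared as a set, here in first-insertion order.

-- ===== PORT A =====
-- state: (pairs : set of tuples, paired : dict)
def find_pairs (values : List Int) : List (Int × Int) :=
  (values.foldl
    (fun (st : PySem.Set (Int × Int) × PySem.Dict Int Bool) num =>
      ((if st.2.contains (-num) then PySem.Set.add st.1 (-num, num) else st.1),
       st.2.insert num true))
    (PySem.Set.empty, PySem.Dict.empty)).1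

-- ===== PORT B =====
def find_pairs_alt (values : List Int) : List (Int × Int) :=
  (PySem.List.pyRange 0 (values.length) 1).foldl
    (fun (result : PySem.Set (Int × Int)) j =>
      (PySem.List.pyRange 0 j 1).foldl
        (fun result i =>
          if PySem.List.pyGetD values i 0 = -(PySem.List.pyGetD values j 0)
          then PySem.Set.add result (PySem.List.pyGetD values i 0, PySem.List.pyGetD values j 0)
          else result)
        result)
    PySem.Set.empty

-- ===== PRECONDITION & SPEC =====
def Spec_find_pairs (values : List Int) (out : List (Int × Int)) : Prop := out = find_pairs_alt values
instance (values : List Int) (out : List (Int × Int)) : Decidable (Spec_find_pairs values out) := by unfold Spec_find_pairs; infer_instance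

-- ===== CLAIM (what is proved, stated in full; the proofs are below) =====
def Claim_equal_find_pairs : Prop := ∀ (values : List Int), Dom_find_pairs values → Spec_find_pairs values (find_pairs values)

-- ===== LEMMAS AND PROOFS =====

theorem set_add_idem {α : Type} [BEq α] [LawfulBEq α] (s : PySem.Set α) (x : α) :
    PySem.Set.add (PySem.Set.add s x) x = PySem.Set.add s x :=
  PySem.Set.add_of_mem (by simp [PySem.Set.mem_add])

theorem pyGetD_append_left (xs ys : List Int) (i : Int) (d : Int)
    (h0 : 0 ≤ i) (h : i < xs.length) :
    PySem.List.pyGetD (xs ++ ys) i d = PySem.List.pyGetD xs i d := by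
  rw [PySem.List.pyGetD_eq_getElem _ _ h0 (by simp; omega),
      PySem.List.pyGetD_eq_getElem _ _ h0 (by omega)]
  rw [List.getElem_append_left]

-- the inner loop of B adds (-v, v) iff -v occurs among the first j elements
theorem inner_loop (vals : List Int) (v : Int) (j : Nat) (hj : j ≤ vals.length)
    (result : PySem.Set (Int × Int)) :
    (PySem.List.pyRange 0 (j : Int) 1).foldl
      (fun r i => if PySem.List.pyGetD vals i 0 = -v
                  then PySem.Set.add r (PySem.List.pyGetD vals i 0, v) else r) result
    = if -v ∈ vals.take j then PySem.Set.add result (-v, v) else result := by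
  induction j generalizing result with
  | zero => simp [PySem.List.pyRange_one_eq_nil]
  | succ j ih =>
    have hjl : j < vals.length := by omega
    rw [show ((j + 1 : Nat) : Int) = (j : Int) + 1 by push_cast; ring,
        PySem.List.pyRange_one_succ_right (Int.natCast_nonneg j), List.foldl_append,
        ih (by omega)]
    have hget : PySem.List.pyGetD vals (j : Int) 0 = vals[j] := by
      rw [PySem.List.pyGetD_eq_getElem _ _ (Int.natCast_nonneg j) (by exact_mod_cast hjl)]
      simp
    have htake : vals.take (j + 1) = vals.take j ++ [vals[j]] := by
      rw [List.take_add_one]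
      simp [List.getElem?_eq_getElem hjl]
    simp only [List.foldl_cons, List.foldl_nil, hget, htake, List.mem_append,
      List.mem_singleton]
    by_cases h1 : -v ∈ vals.take j <;> by_cases h2 : vals[j] = -v <;>
      (simp [h1, h2, set_add_idem, eq_comm] <;> exact fun h => absurd h.symm h2)

-- the dict accumulated by A contains exactly the elements seen so far
theorem dict_contains (vs : List Int) (k : Int) :
    ((vs.foldl
      (fun (st : PySem.Set (Int × Int) × PySem.Dict Int Bool) num =>
        ((if st.2.contains (-num) then PySem.Set.add st.1 (-num, num) else st.1),
         st.2.insert num true))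
      (PySem.Set.empty, PySem.Dict.empty)).2.contains k) = true ↔ k ∈ vs := by
  induction vs using List.reverseRecOn with
  | nil => simp [PySem.Dict.empty, PySem.Dict.contains]
  | append_singleton vs x ih =>
    rw [List.foldl_append]
    simp only [List.foldl_cons, List.foldl_nil, PySem.Dict.contains_insert]
    rw [Bool.or_eq_true, beq_iff_eq]
    simp
    tauto

theorem main_eq (vs : List Int) : find_pairs vs = find_pairs_alt vs := by
  induction vs using List.reverseRecOn with
  | nil => rfl
  | append_singleton vs x ih =>
    unfold find_pairs find_pairs_alt
    rw [List.foldl_append]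
    have hlen : ((vs ++ [x]).length : Int) = (vs.length : Int) + 1 := by
      simp
    rw [hlen, PySem.List.pyRange_one_succ_right (Int.natCast_nonneg vs.length), List.foldl_append]
    -- the first vs.length outer iterations only read indices < vs.length
    have houter :
        (PySem.List.pyRange 0 (vs.length : Int) 1).foldl
          (fun (result : PySem.Set (Int × Int)) j =>
            (PySem.List.pyRange 0 j 1).foldl
              (fun result i =>
                if PySem.List.pyGetD (vs ++ [x]) i 0 = -(PySem.List.pyGetD (vs ++ [x]) j 0)
                then PySem.Set.add result (PySem.List.pyGetD (vs ++ [x]) i 0, PySem.List.pyGetD (vs ++ [x]) j 0)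
                else result)
              result)
          PySem.Set.empty
        = find_pairs_alt vs := by
      unfold find_pairs_alt
      apply PySem.List.foldl_congr_mem
      intro acc j hjmem
      have hj := (PySem.List.mem_pyRange_one.mp hjmem)
      apply PySem.List.foldl_congr_mem
      intro r i himem
      have hi := (PySem.List.mem_pyRange_one.mp himem)
      rw [pyGetD_append_left vs [x] i 0 hi.1 (by omega),
          pyGetD_append_left vs [x] j 0 hj.1 (by omega)]
    rw [houter]
    -- the last outer iteration, j = vs.length, reads x and the prefix vs
    have hx : PySem.List.pyGetD (vs ++ [x]) (vs.length : Int) 0 = x := by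
      rw [PySem.List.pyGetD_eq_getElem _ _ (Int.natCast_nonneg vs.length) (by simp)]
      simp
    simp only [List.foldl_cons, List.foldl_nil, hx]
    rw [inner_loop (vs ++ [x]) x vs.length (by simp), List.take_left]
    -- A's last step
    have ih' : (vs.foldl
        (fun (st : PySem.Set (Int × Int) × PySem.Dict Int Bool) num =>
          ((if st.2.contains (-num) then PySem.Set.add st.1 (-num, num) else st.1),
           st.2.insert num true))
        (PySem.Set.empty, PySem.Dict.empty)).1 = find_pairs_alt vs := ih
    have hc := dict_contains vs (-x)
    by_cases hm : -x ∈ vs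
    · simp only [hc.mpr hm, if_pos hm, if_true]
      rw [ih']
    · have : ((vs.foldl
        (fun (st : PySem.Set (Int × Int) × PySem.Dict Int Bool) num =>
          ((if st.2.contains (-num) then PySem.Set.add st.1 (-num, num) else st.1),
           st.2.insert num true))
        (PySem.Set.empty, PySem.Dict.empty)).2.contains (-x)) = false := by
        rw [← Bool.not_eq_true]; intro h; exact hm (hc.mp h)
      simp only [this, if_neg hm, Bool.false_eq_true, if_false]
      exact ih'

-- ===== VERDICT (by name: the statement is the Claim_ definition above) =====
theorem find_pairs_spec : Claim_equal_find_pairs := by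
  intro values _
  unfold Spec_find_pairs
  exact main_eq values
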